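-- pv_equiv track=rewrite | github.com/MeteorAtNorthGate/nextnano3_generator | tools.py | merge_and_split
-- ===== SOURCE A (Python) =====
-- def merge_and_split(*lists):
--     result = []
--     for outputlist in lists:
--         # 每200个单词分成一组,列表推导式[ XXX for i in range(start,end,step) ]
--         # end-start < step时也会以 i=start 执行一次，只有end一开始就小于等于start时才不执行（步长可以为负，此时start > end才会执行）
--         split_lines = [' '.join(str(x) for x in outputlist[i:i+200]) for i in range(0, len(outputlist), 200)]
--         """ 可以拆解为↓↓↓的方法，但列表推导式比append有优势（底层优化）
--         split_lines = []
--         for i in range(0, len(outputlist), 200):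
--             split_lines.append(' '.join(str(x) for x in outputlist[i:i+200])) # ( XXX for i in list[]是一个生成器，这里还可以再拆开成一层循环=。= )
--         """
--         result.append('\n'.join(split_lines))  # 用换行符拼接回字符串,再将字符串append到result里。
--     #return *result 不合法，可以return arg1,*args ,但*直接放在return后面不会被正确解释
--     return tuple(result)
-- ===== SOURCE B (Python) =====
-- def merge_and_split(*lists):
--     result = []
--     for outputlist in lists:
--         s = ""
--         for i, x in enumerate(outputlist):
--             if i == 0:
--                 sep = ""
--             elif i % 200 == 0:
--                 sep = "\n"
--             else:
--                 sep = " "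
--             s += sep + str(x)
--         result.append(s)
--     return tuple(result)
-- ===== Notes on version B (the rewrite author's own statement) =====
-- stated objective: alternative
-- what changed: Replaces A's two-level chunk structure (slice into 200-item chunks, space-join each chunk, newline-join the chunks) with a single flat pass per list that appends each element preceded by a separator chosen from its index ('' at 0, '\n' at multiples of 200, ' ' otherwise).
import Mathlib
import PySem

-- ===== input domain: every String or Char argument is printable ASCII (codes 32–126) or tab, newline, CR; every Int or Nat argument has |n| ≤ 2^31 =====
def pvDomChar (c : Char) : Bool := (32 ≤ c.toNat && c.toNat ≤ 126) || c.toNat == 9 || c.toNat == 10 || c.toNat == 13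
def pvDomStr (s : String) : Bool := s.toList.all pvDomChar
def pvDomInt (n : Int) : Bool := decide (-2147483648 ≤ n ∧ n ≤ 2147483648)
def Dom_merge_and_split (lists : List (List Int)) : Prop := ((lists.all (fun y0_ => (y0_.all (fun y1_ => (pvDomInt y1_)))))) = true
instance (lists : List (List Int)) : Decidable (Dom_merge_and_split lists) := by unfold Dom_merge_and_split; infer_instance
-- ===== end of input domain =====

-- B replaces A's chunk-then-double-join structure (slice into 200-item chunks, space-join each,
-- newline-join the chunks) with one flat index-driven pass ('' / '\n' / ' ' separator chosen by
-- the element's index); same cost, different decomposition.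
-- Both ports model the call merge_and_split(lists): the *lists varargs tuple is (lists,), so the
-- loop over it runs once, and str(x) is applied to each inner List Int.

-- str(x) for x a Python list of ints (hand-ported, exact: '[' + ', '.join(str at each) + ']')
def pvStrList (l : List Int) : String :=
  "[" ++ PySem.Str.join ", " (l.map PySem.Int.toStr) ++ "]"

-- ===== PORT A =====
-- ' '.join(str(x) for x in outputlist[i:i+200])
def pvALine (outputlist : List (List Int)) (i : Int) : String :=
  PySem.Str.join " " ((PySem.List.slice outputlist (some i) (some (i + 200))).map pvStrList)

-- '\n'.join([pvALine for i in range(0, len(outputlist), 200)])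
def pvAOne (outputlist : List (List Int)) : String :=
  PySem.Str.join "\n" ((PySem.List.pyRange 0 (outputlist.length : Int) 200).map (pvALine outputlist))

-- for outputlist in lists: result.append(...)  — the varargs tuple is the singleton [lists]
def merge_and_split (lists : List (List Int)) : List String :=
  [lists].foldl (fun result outputlist => result ++ [pvAOne outputlist]) []

-- ===== PORT B =====
-- separator before the element at (0-based) index i
def pvBSep (i : Int) : String :=
  if i == 0 then "" else if PySem.Int.mod i 200 == 0 then "\n" else " "

-- s = ""; for i, x in enumerate(outputlist): s += sep(i) + str(x)
def pvBOne (outputlist : List (List Int)) : String :=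
  (PySem.List.enumerate outputlist).foldl
    (fun s p => s ++ (pvBSep p.1 ++ pvStrList p.2)) ""

def merge_and_split_alt (lists : List (List Int)) : List String :=
  [lists].foldl (fun result outputlist => result ++ [pvBOne outputlist]) []

-- ===== PRECONDITION & SPEC =====
def Spec_merge_and_split (lists : List (List Int)) (out : List String) : Prop := out = merge_and_split_alt lists
instance (lists : List (List Int)) (out : List String) : Decidable (Spec_merge_and_split lists out) := by unfold Spec_merge_and_split; infer_instance

-- ===== CLAIM (what is proved, stated in full; the proofs are below) =====
def Claim_equal_merge_and_split : Prop := ∀ (lists : List (List Int)), Dom_merge_and_split lists → Spec_merge_and_split lists (merge_and_split lists)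

-- ===== LEMMAS AND PROOFS =====

-- The common character-level description of the output string, generic in the function f
-- rendering one element to characters, and proofs that both ports compute it.

-- the characters str(x) produces
def pvElem (x : List Int) : List Char := (pvStrList x).toList

-- chars of " x1 x2 … xm" (a space before every element)
def pvPre {α : Type} (f : α → List Char) (xs : List α) : List Char :=
  match xs with
  | [] => []
  | x :: xs => ' ' :: (f x ++ pvPre f xs)

-- chars produced after the first element, given r remaining slots in the current line
def pvMid {α : Type} (f : α → List Char) (r : Nat) (xs : List α) : List Char :=
  match r, xs with
  | _, [] => []
  | 0, x :: xs => '\n' :: (f x ++ pvMid f 199 xs)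
  | r + 1, x :: xs => ' ' :: (f x ++ pvMid f r xs)

-- chars of the whole output string
def pvSpec {α : Type} (f : α → List Char) (l : List α) : List Char :=
  match l with
  | [] => []
  | x :: xs => f x ++ pvMid f 199 xs

-- chars of B's running output from start index k (k a natural number)
def pvTail {α : Type} (f : α → List Char) (k : Nat) (xs : List α) : List Char :=
  match xs with
  | [] => []
  | x :: xs =>
      (if k = 0 then [] else if k % 200 = 0 then ['\n'] else [' ']) ++
        f x ++ pvTail f (k + 1) xs

lemma pvBSep_toList (k : Nat) :
    (pvBSep (k : Int)).toList =
      (if k = 0 then [] else if k % 200 = 0 then ['\n'] else [' ']) := by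
  rcases Nat.eq_zero_or_pos k with h | h
  · subst h; rfl
  · have h1 : ((k : Int)) ≠ 0 := by exact_mod_cast h.ne'
    have hd : ((200 : Int) ∣ (k : Int)) ↔ k % 200 = 0 := by omega
    by_cases h2 : k % 200 = 0
    · have hv : pvBSep (k : Int) = "\n" := by
        simp [pvBSep, hd.mpr h2]
        omega
      rw [hv, if_neg h.ne', if_pos h2]; rfl
    · have hv : pvBSep (k : Int) = " " := by
        have hnd : ¬((200 : Int) ∣ (k : Int)) := fun hh => h2 (hd.mp hh)
        simp [pvBSep, hnd]
        omega
      rw [hv, if_neg h.ne', if_neg h2]; rfl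

lemma pvB_fold (xs : List (List Int)) : ∀ (k : Nat) (s : String),
    ((PySem.List.enumerate xs (k : Int)).foldl
        (fun s p => s ++ (pvBSep p.1 ++ pvStrList p.2)) s).toList
      = s.toList ++ pvTail pvElem k xs := by
  induction xs with
  | nil => intro k s; simp [PySem.List.enumerate, pvTail]
  | cons x xs ih =>
      intro k s
      rw [PySem.List.enumerate_cons]
      have : ((k : Int) + 1) = ((k + 1 : Nat) : Int) := by push_cast; ring
      simp only [List.foldl_cons, this, ih]
      simp [pvTail, pvBSep_toList, pvElem, List.append_assoc]

lemma pvTail_mid {α : Type} (f : α → List Char) (xs : List α) : ∀ (k : Nat), 0 < k →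
    pvTail f k xs = pvMid f ((200 - k % 200) % 200) xs := by
  induction xs with
  | nil => intro k _; simp [pvTail, pvMid]
  | cons x xs ih =>
      intro k hk
      by_cases h : k % 200 = 0
      · have h199 : (200 - (k + 1) % 200) % 200 = 199 := by omega
        simp [pvTail, pvMid, h, hk.ne', ih (k + 1) (by omega), h199]
      · have hm : (200 - k % 200) % 200 = 199 - k % 200 + 1 := by omega
        have h2 : (200 - (k + 1) % 200) % 200 = 199 - k % 200 := by omega
        simp [pvTail, pvMid, h, hk.ne', ih (k + 1) (by omega), hm, h2]

-- B's output string computes pvSpec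
lemma pvBOne_chars (l : List (List Int)) : (pvBOne l).toList = pvSpec pvElem l := by
  cases l with
  | nil => simp [pvBOne, PySem.List.enumerate, pvSpec]
  | cons x xs =>
      have h0 : ((0 : Int)) = ((0 : Nat) : Int) := by norm_num
      unfold pvBOne
      rw [h0, pvB_fold]
      have h1 : pvTail pvElem 1 xs = pvMid pvElem 199 xs := by
        have := pvTail_mid pvElem xs 1 (by omega)
        simpa using this
      simp [pvTail, h1, pvSpec]

-- a space-joined chunk is head ++ pvPre tail
lemma pvLine_chars {α : Type} (f : α → List Char) (x : α) (xs : List α) :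
    PySem.Chars.join [' '] (f x :: xs.map f)
      = f x ++ pvPre f xs := by
  induction xs generalizing x with
  | nil => simp [PySem.Chars.join_singleton, pvPre]
  | cons y ys ih =>
      rw [List.map_cons, PySem.Chars.join_cons_cons, ih y]
      simp [pvPre, List.append_assoc]

-- a join with a nonempty remainder splits off its first part
lemma pvJoin_cons (sep p : List Char) (rest : List (List Char)) (h : rest ≠ []) :
    PySem.Chars.join sep (p :: rest) = p ++ sep ++ PySem.Chars.join sep rest := by
  cases rest with
  | nil => exact absurd rfl h
  | cons q r => exact PySem.Chars.join_cons_cons sep p q r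

lemma pvMid_split {α : Type} (f : α → List Char) (r : Nat) : ∀ (xs : List α),
    pvMid f r xs = pvPre f (xs.take r) ++ pvMid f 0 (xs.drop r) := by
  induction r with
  | zero => intro xs; simp [pvPre]
  | succ r ih =>
      intro xs
      cases xs with
      | nil => simp [pvMid, pvPre]
      | cons x xs => simp [pvMid, pvPre, ih xs, List.append_assoc]

-- number of chunks
def pvCnt (n : Nat) : Nat := (n + 199) / 200

-- the A-side chunk expression, on characters
def pvAChars {α : Type} (f : α → List Char) (l : List α) : List Char :=
  PySem.Chars.join ['\n']
    ((List.range (pvCnt l.length)).map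
      (fun k => PySem.Chars.join [' '] (((l.drop (200 * k)).take 200).map f)))

lemma pvAChars_spec {α : Type} (f : α → List Char) :
    ∀ (n : Nat) (l : List α), l.length = n → pvAChars f l = pvSpec f l := by
  intro n
  induction n using Nat.strong_induction_on with
  | _ n ih =>
    intro l hn
    cases l with
    | nil => simp [pvAChars, pvCnt, pvSpec, PySem.Chars.join_nil]
    | cons x xs =>
      by_cases hle : xs.length ≤ 199
      · -- exactly one chunk
        have hc : pvCnt (x :: xs).length = 1 := by
          unfold pvCnt; simp only [List.length_cons]; omega
        have htake : ((x :: xs).drop 0).take 200 = x :: xs := by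
          rw [List.drop_zero, List.take_of_length_le (by simp; omega)]
        rw [pvAChars, hc]
        simp only [List.range_one, List.map_cons, List.map_nil, Nat.mul_zero, htake,
          PySem.Chars.join_singleton]
        rw [pvLine_chars, pvSpec]
        rw [pvMid_split f 199 xs]
        have hd : xs.drop 199 = [] := List.drop_eq_nil_of_le hle
        have ht : xs.take 199 = xs := List.take_of_length_le hle
        simp [hd, ht, pvMid]
      · -- at least two chunks; recurse on the list after the first 200 elements
        have hc : pvCnt (x :: xs).length = pvCnt ((x :: xs).length - 200) + 1 := by
          unfold pvCnt; simp only [List.length_cons]; omega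
        have hrest : ((x :: xs).drop 200).length = (x :: xs).length - 200 := by simp
        have hihlen : ((x :: xs).drop 200).length < n := by
          rw [hrest]; simp only [List.length_cons] at hn ⊢; omega
        have hih := ih _ hihlen ((x :: xs).drop 200) rfl
        rw [pvAChars, hc, List.range_succ_eq_map, List.map_cons]
        have hpos : 0 < pvCnt ((x :: xs).length - 200) := by
          unfold pvCnt; simp only [List.length_cons]; omega
        have hr0 : List.range (pvCnt ((x :: xs).length - 200)) ≠ [] := by
          rw [ne_eq, List.range_eq_nil]
          omega
        have hne : (List.map
            (fun k => PySem.Chars.join [' '] ((((x :: xs).drop (200 * k)).take 200).map f))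
            (List.map Nat.succ (List.range (pvCnt ((x :: xs).length - 200))))) ≠ [] := by
          intro hcontra
          exact hr0 (List.map_eq_nil_iff.mp (List.map_eq_nil_iff.mp hcontra))
        rw [pvJoin_cons _ _ _ hne]
        rw [List.map_map]
        have hchunks : (List.range (pvCnt ((x :: xs).length - 200))).map
              ((fun k => PySem.Chars.join [' ']
                  ((((x :: xs).drop (200 * k)).take 200).map f)) ∘ Nat.succ)
            = (List.range (pvCnt (((x :: xs).drop 200).length))).map
              (fun k => PySem.Chars.join [' ']
                  ((((( x :: xs).drop 200).drop (200 * k)).take 200).map f)) := by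
          rw [hrest]
          refine List.map_congr_left ?_
          intro k _
          simp only [Function.comp, Nat.succ_eq_add_one]
          rw [List.drop_drop, show (200 : Nat) * (k + 1) = 200 + 200 * k from by ring]
        rw [hchunks]
        have hrw : PySem.Chars.join ['\n']
              ((List.range (pvCnt (((x :: xs).drop 200).length))).map
                (fun k => PySem.Chars.join [' ']
                    ((((( x :: xs).drop 200).drop (200 * k)).take 200).map f)))
            = pvSpec f ((x :: xs).drop 200) := by
          rw [← hih, pvAChars]
        rw [hrw]
        -- left side: the first chunk line
        have hfirst : ((x :: xs).drop (200 * 0)).take 200 = x :: xs.take 199 := by simp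
        rw [hfirst, List.map_cons, pvLine_chars]
        -- right side: pvSpec (x :: xs) split at the chunk boundary
        rw [pvSpec, pvMid_split f 199 xs]
        have hdxs : xs.drop 199 = (x :: xs).drop 200 := by simp
        obtain ⟨y, ys, hys⟩ : ∃ y ys, (x :: xs).drop 200 = y :: ys := by
          rcases h : (x :: xs).drop 200 with _ | ⟨y, ys⟩
          · exfalso; have := congrArg List.length h; simp at this; omega
          · exact ⟨y, ys, rfl⟩
        rw [hdxs, hys, pvMid]
        simp [List.append_assoc, pvSpec]

-- A's port reduces to the pvAChars expression
lemma pvAOne_chars (l : List (List Int)) : (pvAOne l).toList = pvAChars pvElem l := by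
  unfold pvAOne pvAChars
  rw [PySem.Str.toList_join]
  have hr : PySem.List.pyRange 0 (l.length : Int) 200
      = (List.range (pvCnt l.length)).map (fun k => ((200 * k : Nat) : Int)) := by
    rw [PySem.List.pyRange_of_pos 0 (l.length : Int) (by norm_num)]
    rcases Nat.eq_zero_or_pos l.length with h | h
    · simp [h, pvCnt]
    · have hlt : (0 : Int) < (l.length : Int) := by exact_mod_cast h
      simp only [hlt, if_pos]
      have : ((((l.length : Int) - 0 + 200 - 1) / 200)).toNat = pvCnt l.length := by
        simp only [pvCnt]
        omega
      rw [this]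
      refine List.map_congr_left ?_
      intro k _
      push_cast
      ring
  rw [hr]
  simp only [List.map_map]
  rw [show ("\n" : String).toList = ['\n'] from rfl]
  refine congrArg (PySem.Chars.join ['\n']) ?_
  refine List.map_congr_left ?_
  intro k _
  simp only [Function.comp, pvALine]
  have hslice : PySem.List.slice l (some ((200 * k : Nat) : Int)) (some (((200 * k : Nat) : Int) + 200))
      = (l.drop (200 * k)).take 200 := by
    have h2 : (((200 * k : Nat) : Int) + 200) = (((200 * k + 200 : Nat)) : Int) := by push_cast; ring
    rw [h2, PySem.List.slice_natCast]
    congr 1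
    omega
  rw [PySem.Str.toList_join, hslice]
  rw [show (" " : String).toList = [' '] from rfl]
  rw [List.map_map]
  exact congrArg _ (List.map_congr_left (fun a _ => rfl))

lemma pvOne_eq (l : List (List Int)) : pvAOne l = pvBOne l := by
  have h : (pvAOne l).toList = (pvBOne l).toList := by
    rw [pvAOne_chars, pvBOne_chars, pvAChars_spec pvElem l.length l rfl]
  exact String.toList_injective h

-- ===== VERDICT (by name: the statement is the Claim_ definition above) =====
theorem merge_and_split_spec : Claim_equal_merge_and_split := by
  intro lists _
  unfold Spec_merge_and_split merge_and_split merge_and_split_alt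
  simp only [List.foldl_cons, List.foldl_nil, List.nil_append]
  rw [pvOne_eq]
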